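-- pv_equiv track=rewrite | github.com/0z4ck/zeta_zero | moves.py | silver
-- ===== SOURCE A (Python) =====
-- def silver(x, y, me=True):
--     if me:
--         move_list = [(x,y-1),(x-1,y-1),(x+1,y-1),(x-1,y+1),(x+1,y+1)]
--         if x == 0:
--             for im in ((x-1,y-1),(x-1,y+1)):
--               try:
--                 move_list.remove(im)
--               except:
--                 pass
--         if x == 8:
--             for im in ((x+1,y-1),(x+1,y+1)):
--               try:
--                 move_list.remove(im)
--               except:
--                 pass
--         if y == 0:
--             for im in ((x,y-1),(x-1,y-1),(x+1,y-1)):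
--               try:
--                 move_list.remove(im)
--               except:
--                 pass
--         if y == 8:
--             for im in ((x-1,y+1),(x+1,y+1)):
--               try:
--                 move_list.remove(im)
--               except:
--                 pass
--
--         return move_list
--     else:
--         move_list = [(x,y+1),(x-1,y-1),(x+1,y-1),(x-1,y+1),(x+1,y+1)]
--         if x == 0:
--             for im in ((x-1,y-1),(x-1,y+1)):
--               try:
--                 move_list.remove(im)
--               except:
--                 pass
--         if x == 8:
--             for im in ((x+1,y-1),(x+1,y+1)):
--               try:
--                 move_list.remove(im)
--               except:
--                 pass
--         if y == 0:
--             for im in ((x-1,y-1),(x+1,y-1)):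
--               try:
--                 move_list.remove(im)
--               except:
--                 pass
--         if y == 8:
--             for im in ((x,y+1),(x-1,y+1),(x+1,y+1)):
--               try:
--                 move_list.remove(im)
--               except:
--                 pass
--         return move_list
-- ===== SOURCE B (Python) =====
-- # Table-driven reimplementation: the result depends only on the board zone
-- # (x==0 / x==8 / elsewhere, y==0 / y==8 / elsewhere) and the colour, so all
-- # 18 possible offset lists are precomputed once; silver() just classifies the
-- # square and translates the stored offsets.
-- _Z = lambda v: 0 if v == 0 else (2 if v == 8 else 1)
--
-- _SILVER_TABLE = {
--     # me=True: forward is (0,-1)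
--     (True, 1, 1): [(0, -1), (-1, -1), (1, -1), (-1, 1), (1, 1)],
--     (True, 0, 1): [(0, -1), (1, -1), (1, 1)],
--     (True, 2, 1): [(0, -1), (-1, -1), (-1, 1)],
--     (True, 1, 0): [(-1, 1), (1, 1)],
--     (True, 1, 2): [(0, -1), (-1, -1), (1, -1)],
--     (True, 0, 0): [(1, 1)],
--     (True, 0, 2): [(0, -1), (1, -1)],
--     (True, 2, 0): [(-1, 1)],
--     (True, 2, 2): [(0, -1), (-1, -1)],
--     # me=False: forward is (0,1)
--     (False, 1, 1): [(0, 1), (-1, -1), (1, -1), (-1, 1), (1, 1)],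
--     (False, 0, 1): [(0, 1), (1, -1), (1, 1)],
--     (False, 2, 1): [(0, 1), (-1, -1), (-1, 1)],
--     (False, 1, 0): [(0, 1), (-1, 1), (1, 1)],
--     (False, 1, 2): [(-1, -1), (1, -1)],
--     (False, 0, 0): [(0, 1), (1, 1)],
--     (False, 0, 2): [(1, -1)],
--     (False, 2, 0): [(0, 1), (-1, 1)],
--     (False, 2, 2): [(-1, -1)],
-- }
--
-- def silver(x, y, me=True):
--     return [(x + dx, y + dy) for dx, dy in _SILVER_TABLE[(me, _Z(x), _Z(y))]]
-- ===== Notes on version B (the rewrite author's own statement) =====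
-- stated objective: alternative
-- what changed: B replaces A's build-then-remove branches with a precomputed lookup table of all 18 offset lists keyed by board zone (x==0/x==8/else, y==0/y==8/else, colour); at call time it only classifies the square and translates the stored offsets.
import Mathlib
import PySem

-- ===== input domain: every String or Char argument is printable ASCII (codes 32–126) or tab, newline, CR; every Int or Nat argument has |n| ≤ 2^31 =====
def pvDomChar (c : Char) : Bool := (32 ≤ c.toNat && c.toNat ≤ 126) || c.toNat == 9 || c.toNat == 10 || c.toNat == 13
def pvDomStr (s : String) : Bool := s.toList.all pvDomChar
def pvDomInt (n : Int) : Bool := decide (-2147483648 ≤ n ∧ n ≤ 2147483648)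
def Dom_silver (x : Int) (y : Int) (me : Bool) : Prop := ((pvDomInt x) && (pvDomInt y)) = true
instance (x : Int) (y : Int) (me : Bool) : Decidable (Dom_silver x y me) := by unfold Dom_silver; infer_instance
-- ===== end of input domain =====

-- B replaces A's build-then-remove branches with a precomputed table of the 18 possible
-- offset lists keyed by board zone and colour (objective: alternative decomposition).


-- ===== PORT A =====
-- try: move_list.remove(im) except: pass — remove? returns none exactly where Python raises ValueError
def pyTryRemove (l : List (Int × Int)) (im : Int × Int) : List (Int × Int) :=
  (PySem.List.remove? l im).getD l

def silver (x : Int) (y : Int) (me : Bool) : List (Int × Int) :=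
  if me then
    let ml := [(x,y-1),(x-1,y-1),(x+1,y-1),(x-1,y+1),(x+1,y+1)]
    let ml := if x == 0 then [(x-1,y-1),(x-1,y+1)].foldl pyTryRemove ml else ml
    let ml := if x == 8 then [(x+1,y-1),(x+1,y+1)].foldl pyTryRemove ml else ml
    let ml := if y == 0 then [(x,y-1),(x-1,y-1),(x+1,y-1)].foldl pyTryRemove ml else ml
    let ml := if y == 8 then [(x-1,y+1),(x+1,y+1)].foldl pyTryRemove ml else ml
    ml
  else
    let ml := [(x,y+1),(x-1,y-1),(x+1,y-1),(x-1,y+1),(x+1,y+1)]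
    let ml := if x == 0 then [(x-1,y-1),(x-1,y+1)].foldl pyTryRemove ml else ml
    let ml := if x == 8 then [(x+1,y-1),(x+1,y+1)].foldl pyTryRemove ml else ml
    let ml := if y == 0 then [(x-1,y-1),(x+1,y-1)].foldl pyTryRemove ml else ml
    let ml := if y == 8 then [(x,y+1),(x-1,y+1),(x+1,y+1)].foldl pyTryRemove ml else ml
    ml

-- ===== PORT B =====
-- the module-level dict _SILVER_TABLE of Source B, as an association list in the same insertion order
def silverTable : List ((Bool × Int × Int) × List (Int × Int)) :=
  [ ((true, 1, 1), [(0,-1), (-1,-1), (1,-1), (-1,1), (1,1)]),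
    ((true, 0, 1), [(0,-1), (1,-1), (1,1)]),
    ((true, 2, 1), [(0,-1), (-1,-1), (-1,1)]),
    ((true, 1, 0), [(-1,1), (1,1)]),
    ((true, 1, 2), [(0,-1), (-1,-1), (1,-1)]),
    ((true, 0, 0), [(1,1)]),
    ((true, 0, 2), [(0,-1), (1,-1)]),
    ((true, 2, 0), [(-1,1)]),
    ((true, 2, 2), [(0,-1), (-1,-1)]),
    ((false, 1, 1), [(0,1), (-1,-1), (1,-1), (-1,1), (1,1)]),
    ((false, 0, 1), [(0,1), (1,-1), (1,1)]),
    ((false, 2, 1), [(0,1), (-1,-1), (-1,1)]),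
    ((false, 1, 0), [(0,1), (-1,1), (1,1)]),
    ((false, 1, 2), [(-1,-1), (1,-1)]),
    ((false, 0, 0), [(0,1), (1,1)]),
    ((false, 0, 2), [(1,-1)]),
    ((false, 2, 0), [(0,1), (-1,1)]),
    ((false, 2, 2), [(-1,-1)]) ]

-- _Z = lambda v: 0 if v == 0 else (2 if v == 8 else 1)
def silverZone (v : Int) : Int := if v == 0 then 0 else if v == 8 then 2 else 1

def silver_alt (x : Int) (y : Int) (me : Bool) : List (Int × Int) :=
  let offs := (silverTable.lookup (me, silverZone x, silverZone y)).getD []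
  offs.map (fun d => (x + d.1, y + d.2))

-- ===== PRECONDITION & SPEC =====
def Spec_silver (x : Int) (y : Int) (me : Bool) (out : List (Int × Int)) : Prop := out = silver_alt x y me
instance (x : Int) (y : Int) (me : Bool) (out : List (Int × Int)) : Decidable (Spec_silver x y me out) := by unfold Spec_silver; infer_instance

-- ===== CLAIM (what is proved, stated in full; the proofs are below) =====
def Claim_equal_silver : Prop := ∀ (x : Int) (y : Int) (me : Bool), Dom_silver x y me → Spec_silver x y me (silver x y me)

-- ===== LEMMAS AND PROOFS =====

-- ===== VERDICT (by name: the statement is the Claim_ definition above) =====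
theorem silver_spec : Claim_equal_silver := by
  intro x y me _
  unfold Spec_silver silver silver_alt silverZone
  have h3 : x - 1 ≠ x + 1 := by omega
  have h4 : y - 1 ≠ y + 1 := by omega
  cases me <;>
    by_cases hx0 : x = 0 <;> by_cases hx8 : x = 8 <;>
    by_cases hy0 : y = 0 <;> by_cases hy8 : y = 8 <;>
    first
      | (subst_vars; decide)
      | simp_all [pyTryRemove, PySem.List.remove?_cons_self, PySem.List.remove?_cons_of_ne,
                  silverTable, List.lookup, Prod.mk.injEq, BEq.beq] <;> omega
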